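-- pv_equiv track=rewrite | github.com/pengwow/examples | python/ui/nice-vibes/scripts/build_master_prompt.py | build_references_section
-- ===== SOURCE A (Python) =====
-- def build_references_section(excluded_refs: list[tuple[str, str, str]], github_url: str, online: bool) -> str:
--     """Build a section listing excluded content with references."""
--     if not excluded_refs:
--         return ''
--
--     lines = [
--         '\n---\n',
--         '## Additional Documentation\n',
--         'The following documentation is not included in this prompt but available for reference:\n',
--     ]
--
--     # Group by category
--     by_category: dict[str, list[tuple[str, str]]] = {}
--     for category, path, summary in excluded_refs:
--         if category not in by_category:
--             by_category[category] = []
--         by_category[category].append((path, summary))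
--
--     for category, items in by_category.items():
--         lines.append(f'\n### {category}\n')
--         for path, summary in items:
--             if online:
--                 ref = f'{github_url}/blob/main/{path}'
--             else:
--                 ref = path
--
--             filename = path.split('/')[-1]
--             if summary:
--                 lines.append(f'- **{filename}** (`{ref}`): {summary}')
--             else:
--                 lines.append(f'- **{filename}** (`{ref}`)')
--
--     lines.append('\n')
--     return '\n'.join(lines)
-- ===== SOURCE B (Python) =====
-- def build_references_section(excluded_refs: list[tuple[str, str, str]], github_url: str, online: bool) -> str:
--     """Build a section listing excluded content with references."""
--     if not excluded_refs:
--         return ''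
--
--     def line(path, summary):
--         ref = f'{github_url}/blob/main/{path}' if online else path
--         filename = path.split('/')[-1]
--         return f'- **{filename}** (`{ref}`): {summary}' if summary else f'- **{filename}** (`{ref}`)'
--
--     categories = list(dict.fromkeys(c for c, _, _ in excluded_refs))
--     body = [item
--             for cat in categories
--             for item in [f'\n### {cat}\n'] + [line(p, s) for c, p, s in excluded_refs if c == cat]]
--     header = [
--         '\n---\n',
--         '## Additional Documentation\n',
--         'The following documentation is not included in this prompt but available for reference:\n',
--     ]
--     return '\n'.join(header + body + ['\n'])
-- ===== Notes on version B (the rewrite author's own statement) =====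
-- stated objective: alternative
-- what changed: Drops A's grouping dict and accumulator loops: B dedups the category column once and then produces the body declaratively as a nested comprehension (per category, a header plus a filter-and-map over the original list), concatenating header + body + trailer for the join.
import Mathlib
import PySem

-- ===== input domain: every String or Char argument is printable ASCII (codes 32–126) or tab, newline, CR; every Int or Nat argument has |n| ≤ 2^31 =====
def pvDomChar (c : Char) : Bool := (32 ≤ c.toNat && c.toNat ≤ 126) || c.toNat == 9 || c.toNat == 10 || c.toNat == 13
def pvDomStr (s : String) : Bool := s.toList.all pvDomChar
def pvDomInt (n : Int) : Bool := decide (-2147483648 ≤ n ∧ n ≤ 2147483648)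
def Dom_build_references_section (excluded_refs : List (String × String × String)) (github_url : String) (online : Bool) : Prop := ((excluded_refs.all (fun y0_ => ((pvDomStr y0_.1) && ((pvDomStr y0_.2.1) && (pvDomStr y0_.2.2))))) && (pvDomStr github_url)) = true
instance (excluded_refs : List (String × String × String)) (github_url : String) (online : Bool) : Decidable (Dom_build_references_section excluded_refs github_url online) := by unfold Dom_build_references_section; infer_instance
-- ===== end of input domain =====

-- B drops A's grouping dict and accumulator loops: it dedups the category column once and builds the
-- body as a flatMap of per-category (header :: filter-and-map) blocks (alternative decomposition; no speed claim).


-- shared helper: the markdown line for one (path, summary) entry (identical code in both Pythons)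
def pvRefLine (github_url : String) (online : Bool) (path summary : String) : String :=
  let ref := if online then github_url ++ "/blob/main/" ++ path else path
  let filename := ((PySem.Str.split? path "/").getD []).getLastD ""   -- path.split('/')[-1]; split is never empty
  if summary ≠ "" then "- **" ++ filename ++ "** (`" ++ ref ++ "`): " ++ summary
  else "- **" ++ filename ++ "** (`" ++ ref ++ "`)"

def pvHeader : List String :=
  ["\n---\n",
   "## Additional Documentation\n",
   "The following documentation is not included in this prompt but available for reference:\n"]

-- ===== PORT A =====
def build_references_section (excluded_refs : List (String × String × String)) (github_url : String) (online : Bool) : String :=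
  if excluded_refs = [] then "" else
  -- group by category: dict insertion order = first appearance
  let by_category : PySem.Dict String (List (String × String)) :=
    excluded_refs.foldl (fun d t => d.modify t.1 [] (· ++ [(t.2.1, t.2.2)])) PySem.Dict.empty
  let lines :=
    by_category.items.foldl (fun acc ci =>
      ci.2.foldl (fun acc2 ps => acc2 ++ [pvRefLine github_url online ps.1 ps.2])
        (acc ++ ["\n### " ++ ci.1 ++ "\n"])) pvHeader
  PySem.Str.join "\n" (lines ++ ["\n"])

-- ===== PORT B =====
def build_references_section_alt (excluded_refs : List (String × String × String)) (github_url : String) (online : Bool) : String :=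
  if excluded_refs = [] then "" else
  -- categories = list(dict.fromkeys(...)); body = nested comprehension, no accumulator
  let categories : List String := PySem.List.dedup (excluded_refs.map (fun t => t.1))
  let body : List String := categories.flatMap (fun cat =>
    ("\n### " ++ cat ++ "\n") ::
      ((excluded_refs.filter (fun t => t.1 == cat)).map (fun t => pvRefLine github_url online t.2.1 t.2.2)))
  PySem.Str.join "\n" (pvHeader ++ body ++ ["\n"])

-- ===== PRECONDITION & SPEC =====
def Spec_build_references_section (excluded_refs : List (String × String × String)) (github_url : String) (online : Bool) (out : String) : Prop := out = build_references_section_alt excluded_refs github_url online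
instance (excluded_refs : List (String × String × String)) (github_url : String) (online : Bool) (out : String) : Decidable (Spec_build_references_section excluded_refs github_url online out) := by unfold Spec_build_references_section; infer_instance

-- ===== CLAIM (what is proved, stated in full; the proofs are below) =====
def Claim_equal_build_references_section : Prop := ∀ (excluded_refs : List (String × String × String)) (github_url : String) (online : Bool), Dom_build_references_section excluded_refs github_url online → Spec_build_references_section excluded_refs github_url online (build_references_section excluded_refs github_url online)

-- ===== LEMMAS AND PROOFS =====

-- A's grouping dict, characterised: items = one entry per distinct category, carrying the
-- in-order (path, summary) pairs of that category.
theorem pv_items_char (excluded_refs : List (String × String × String)) :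
    (excluded_refs.foldl (fun d t => d.modify t.1 [] (· ++ [(t.2.1, t.2.2)])) PySem.Dict.empty).items
      = (PySem.Set.ofList (excluded_refs.map (fun t => t.1))).map
          (fun c => (c, (excluded_refs.filter (fun t => t.1 == c)).map (fun t => (t.2.1, t.2.2)))) := by
  set d := excluded_refs.foldl (fun d t => d.modify t.1 [] (· ++ [(t.2.1, t.2.2)])) PySem.Dict.empty with hd
  have hnd : d.keys.Nodup := by
    rw [hd]
    exact PySem.Dict.nodup_keys_foldl_modify_key excluded_refs (fun t => t.1) []
      (fun d t => (· ++ [(t.2.1, t.2.2)])) PySem.Dict.empty PySem.Dict.nodup_keys_empty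
  have hkeys : d.keys = PySem.Set.ofList (excluded_refs.map (fun t => t.1)) := by
    rw [hd, PySem.Dict.keys_foldl_modify_key]
    simp [PySem.Dict.keys_empty, PySem.Set.update, PySem.Set.ofList_eq_foldl]
  have hget : ∀ c, d.getD c [] = (excluded_refs.filter (fun t => t.1 == c)).map (fun t => (t.2.1, t.2.2)) := by
    intro c
    have := PySem.Dict.getD_foldl_modify_append
      (l := excluded_refs.map (fun t => (t.1, (t.2.1, t.2.2)))) (d := PySem.Dict.empty) (c := c)
    rw [List.foldl_map] at this
    simpa [List.filter_map, Function.comp, hd] using this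
  rw [PySem.Dict.items_eq_map_keys d hnd [], hkeys]
  exact List.map_congr_left (fun c _ => by rw [hget c])

-- ===== VERDICT (by name: the statement is the Claim_ definition above) =====
theorem build_references_section_spec : Claim_equal_build_references_section := by
  intro excluded_refs github_url online _
  unfold Spec_build_references_section build_references_section build_references_section_alt
  by_cases h : excluded_refs = []
  · simp [h]
  · simp only [if_neg h, PySem.List.dedup_eq_ofList]
    congr 1
    rw [pv_items_char, List.foldl_map]
    have hfold :
        ∀ (cats : List String) (acc : List String),
          cats.foldl (fun acc c =>
            ((excluded_refs.filter (fun t => t.1 == c)).map (fun t => (t.2.1, t.2.2))).foldl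
              (fun acc2 ps => acc2 ++ [pvRefLine github_url online ps.1 ps.2])
              (acc ++ ["\n### " ++ c ++ "\n"])) acc
          = acc ++ cats.flatMap (fun cat =>
              ("\n### " ++ cat ++ "\n") ::
                ((excluded_refs.filter (fun t => t.1 == cat)).map
                  (fun t => pvRefLine github_url online t.2.1 t.2.2))) := by
      intro cats
      induction cats with
      | nil => intro acc; simp
      | cons c cs ih =>
        intro acc
        simp only [List.foldl_cons, List.flatMap_cons, ih]
        rw [PySem.List.foldl_append_singleton_eq_map, List.map_map]
        simp [List.append_assoc, Function.comp]
    rw [hfold]
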